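-- pv_equiv track=rewrite | github.com/MicheleDelliVeneri/ALMASim | devops/imageparams_base.py | get_first_unflagged_channel_from_center
-- ===== SOURCE A (Python) =====
-- def get_first_unflagged_channel_from_center(channel_flags):
--     """
--     Find first unflagged channel from center channel.
--     """
--     i_low = i_high = None
--     num_channels = len(channel_flags)
--     center_channel = int(num_channels // 2)
--
--     for i in range(center_channel, -1, -1):
--         if channel_flags[i] == False:
--             i_low = i
--             break
--
--     for i in range(center_channel, num_channels):
--         if channel_flags[i] == False:
--             i_high = i
--             break
--
--     if (i_low is None) and (i_high is None):
--         return None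
--     elif (i_low is None):
--         return i_high
--     elif (i_high is None):
--         return i_low
--     else:
--         if (center_channel - i_low) < (i_high - center_channel):
--             return i_low
--         else:
--             return i_high
-- ===== SOURCE B (Python) =====
-- def get_first_unflagged_channel_from_center(channel_flags):
--     """
--     Find first unflagged channel from center channel, by a single
--     outward-expanding scan (distance d = 0, 1, 2, ...), high side first.
--     """
--     num = len(channel_flags)
--     center = num // 2
--     for d in range(num + 1):
--         hi = center + d
--         if hi < num and channel_flags[hi] == False:
--             return hi
--         lo = center - d
--         if lo >= 0 and channel_flags[lo] == False:
--             return lo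
--     return None
-- ===== Notes on version B (the rewrite author's own statement) =====
-- stated objective: simpler
-- what changed: Replaces A's two separate directional scans plus a four-way distance comparison by a single outward-expanding loop over the distance d from the center, returning the first unflagged index found (high side checked first so ties go high, as in A).
import Mathlib
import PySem

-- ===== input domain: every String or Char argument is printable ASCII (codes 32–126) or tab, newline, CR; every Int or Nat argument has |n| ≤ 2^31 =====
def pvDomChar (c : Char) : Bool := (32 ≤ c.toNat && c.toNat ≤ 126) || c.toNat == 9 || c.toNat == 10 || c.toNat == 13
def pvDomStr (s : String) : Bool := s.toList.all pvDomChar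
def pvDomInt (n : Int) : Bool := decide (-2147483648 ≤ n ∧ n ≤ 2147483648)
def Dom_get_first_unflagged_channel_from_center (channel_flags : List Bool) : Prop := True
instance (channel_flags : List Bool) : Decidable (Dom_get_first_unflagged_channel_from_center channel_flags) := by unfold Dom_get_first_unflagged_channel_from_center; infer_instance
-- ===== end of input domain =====

-- B replaces A's two directional scans + distance comparison by one outward-expanding
-- loop from the center (objective: simpler).  Both A and B raise IndexError on the
-- empty list, which Pre_ excludes.

-- ===== PORT A =====

-- one `for i in …: if channel_flags[i] == False: break` loop of A, over its range list
def pvScanA (flags : List Bool) : List Int → Option Int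
  | [] => none
  | i :: rest =>
    match PySem.List.pyGet? flags i with
    | none => none          -- IndexError (only reachable on the empty list, outside Pre_)
    | some b => if b = false then some i else pvScanA flags rest

-- A's final if/elif/else chain combining i_low and i_high
def pvCombineA (c : Int) : Option Int → Option Int → Option Int
  | none, none => none
  | none, some h => some h
  | some l, none => some l
  | some l, some h => if c - l < h - c then some l else some h

def get_first_unflagged_channel_from_center (channel_flags : List Bool) : Option Int :=
  let num : Int := channel_flags.length
  let c : Int := PySem.Int.floordiv num 2
  let i_low := pvScanA channel_flags (PySem.List.pyRange c (-1) (-1))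
  let i_high := pvScanA channel_flags (PySem.List.pyRange c num 1)
  pvCombineA c i_low i_high

-- ===== PORT B =====

-- B's single `for d in range(num + 1)` loop, over its range list
def pvLoopB (flags : List Bool) (num c : Int) : List Int → Option Int
  | [] => none
  | d :: rest =>
    if c + d < num ∧ PySem.List.pyGet? flags (c + d) = some false then some (c + d)
    else if 0 ≤ c - d ∧ PySem.List.pyGet? flags (c - d) = some false then some (c - d)
    else pvLoopB flags num c rest

def get_first_unflagged_channel_from_center_alt (channel_flags : List Bool) : Option Int :=
  let num : Int := channel_flags.length
  let c : Int := PySem.Int.floordiv num 2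
  pvLoopB channel_flags num c (PySem.List.pyRange 0 (num + 1) 1)

-- ===== PRECONDITION & SPEC =====
-- On the empty list both Pythons raise IndexError, so it is excluded.
def Pre_get_first_unflagged_channel_from_center (channel_flags : List Bool) : Prop :=
  channel_flags ≠ []
instance (channel_flags : List Bool) : Decidable (Pre_get_first_unflagged_channel_from_center channel_flags) := by unfold Pre_get_first_unflagged_channel_from_center; infer_instance

def pvWitness_get_first_unflagged_channel_from_center : List Bool := [true, false, true]

def Spec_get_first_unflagged_channel_from_center (channel_flags : List Bool) (out : Option Int) : Prop := out = get_first_unflagged_channel_from_center_alt channel_flags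
instance (channel_flags : List Bool) (out : Option Int) : Decidable (Spec_get_first_unflagged_channel_from_center channel_flags out) := by unfold Spec_get_first_unflagged_channel_from_center; infer_instance

-- ===== CLAIM (what is proved, stated in full; the proofs are below) =====
def Claim_equal_get_first_unflagged_channel_from_center : Prop := ∀ (channel_flags : List Bool), Dom_get_first_unflagged_channel_from_center channel_flags → Pre_get_first_unflagged_channel_from_center channel_flags → Spec_get_first_unflagged_channel_from_center channel_flags (get_first_unflagged_channel_from_center channel_flags)

-- ===== LEMMAS AND PROOFS =====

lemma pvScanA_mem {flags : List Bool} : ∀ {l : List Int} {x : Int},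
    pvScanA flags l = some x → x ∈ l := by
  intro l
  induction l with
  | nil => intro x h; simp [pvScanA] at h
  | cons i rest ih =>
    intro x h
    simp only [pvScanA] at h
    cases hg : PySem.List.pyGet? flags i with
    | none => rw [hg] at h; exact absurd h (by simp)
    | some b =>
      rw [hg] at h
      by_cases hb : b = false
      · simp [hb] at h; simp [h]
      · simp [hb] at h; exact List.mem_cons_of_mem _ (ih h)

-- the interleaved induction relating A's two scans (restricted to distance ≥ k)
-- to B's loop over the remaining distances k, k+1, …, n
lemma pv_key (flags : List Bool) (n c : Int) (hn : n = flags.length)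
    (hc0 : 0 ≤ c) (hcn : c < n) :
    ∀ (m : Nat) (k : Int), 0 ≤ k → k + m = n + 1 →
      pvCombineA c (pvScanA flags (PySem.List.pyRange (c - k) (-1) (-1)))
                   (pvScanA flags (PySem.List.pyRange (c + k) n 1))
        = pvLoopB flags n c (PySem.List.pyRange k (n + 1) 1) := by
  intro m
  induction m with
  | zero =>
    intro k hk0 hkm
    have hk : k = n + 1 := by push_cast at hkm; omega
    rw [PySem.List.pyRange_one_eq_nil (by omega),
        PySem.List.pyRange_neg_one_eq_nil (by omega),
        PySem.List.pyRange_one_eq_nil (by omega)]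
    rfl
  | succ m ih =>
    intro k hk0 hkm
    have hkn : k ≤ n := by push_cast at hkm; omega
    -- unfold B's loop one step
    conv_rhs => rw [PySem.List.pyRange_one_cons (show k < n + 1 by push_cast at hkm; omega)]
    simp only [pvLoopB]
    by_cases hhi : c + k < n ∧ PySem.List.pyGet? flags (c + k) = some false
    · -- high candidate fires: B returns c + k; A's i_high is c + k and wins or is alone
      obtain ⟨hlt, hf⟩ := hhi
      rw [if_pos ⟨hlt, hf⟩]
      rw [PySem.List.pyRange_one_cons (by omega)]
      simp only [pvScanA, hf, reduceIte]
      cases hlow : pvScanA flags (PySem.List.pyRange (c - k) (-1) (-1)) with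
      | none => rfl
      | some l =>
        have hl : l ≤ c - k := by
          have := pvScanA_mem hlow
          rw [PySem.List.mem_pyRange_neg_one] at this
          omega
        simp only [pvCombineA]
        rw [if_neg (by omega)]
    · rw [if_neg hhi]
      by_cases hlo : 0 ≤ c - k ∧ PySem.List.pyGet? flags (c - k) = some false
      · -- low candidate fires: B returns c - k; A's i_low is c - k and wins
        obtain ⟨hge, hf⟩ := hlo
        rw [if_pos ⟨hge, hf⟩]
        rw [PySem.List.pyRange_neg_one_cons (by omega)]
        simp only [pvScanA, hf, reduceIte]
        -- A's i_high (if any) lies at distance > k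
        by_cases hhr : c + k < n
        · -- high range is nonempty but its head is flagged (or out): head is true here
          have hnf : PySem.List.pyGet? flags (c + k) ≠ some false := fun h => hhi ⟨hhr, h⟩
          obtain ⟨b, hb⟩ : ∃ b, PySem.List.pyGet? flags (c + k) = some b := by
            have : PySem.Raise.InRange flags.length (c + k) := by
              constructor <;> omega
            rcases hx : PySem.List.pyGet? flags (c + k) with _ | b
            · rw [PySem.List.pyGet?_eq_none_iff] at hx; exact absurd this hx
            · exact ⟨b, rfl⟩
          have hbt : b = true := by
            cases b
            · exact absurd hb hnf
            · rfl
          rw [PySem.List.pyRange_one_cons (by omega)]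
          simp [pvScanA, hb, hbt]
          cases hhigh : pvScanA flags (PySem.List.pyRange (c + k + 1) n 1) with
          | none => rfl
          | some h =>
            have hh : c + k + 1 ≤ h := by
              have := pvScanA_mem hhigh
              rw [PySem.List.mem_pyRange_one] at this
              omega
            simp only [pvCombineA]
            rw [if_pos (by omega)]
        · rw [PySem.List.pyRange_one_eq_nil (by omega)]
          rfl
      · -- neither fires: both of A's scans skip distance k; recurse
        rw [if_neg hlo]
        have hlowstep : pvScanA flags (PySem.List.pyRange (c - k) (-1) (-1))
            = pvScanA flags (PySem.List.pyRange (c - (k + 1)) (-1) (-1)) := by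
          by_cases hge : 0 ≤ c - k
          · have hnf : PySem.List.pyGet? flags (c - k) ≠ some false := fun h => hlo ⟨hge, h⟩
            obtain ⟨b, hb⟩ : ∃ b, PySem.List.pyGet? flags (c - k) = some b := by
              have : PySem.Raise.InRange flags.length (c - k) := by
                constructor <;> omega
              rcases hx : PySem.List.pyGet? flags (c - k) with _ | b
              · rw [PySem.List.pyGet?_eq_none_iff] at hx; exact absurd this hx
              · exact ⟨b, rfl⟩
            have hbt : b = true := by
              cases b
              · exact absurd hb hnf
              · rfl
            rw [PySem.List.pyRange_neg_one_cons (by omega)]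
            simp [pvScanA, hb, hbt]
            congr 2
            ring
          · rw [PySem.List.pyRange_neg_one_eq_nil (by omega),
                PySem.List.pyRange_neg_one_eq_nil (by omega)]
        have hhighstep : pvScanA flags (PySem.List.pyRange (c + k) n 1)
            = pvScanA flags (PySem.List.pyRange (c + (k + 1)) n 1) := by
          by_cases hlt : c + k < n
          · have hnf : PySem.List.pyGet? flags (c + k) ≠ some false := fun h => hhi ⟨hlt, h⟩
            obtain ⟨b, hb⟩ : ∃ b, PySem.List.pyGet? flags (c + k) = some b := by
              have : PySem.Raise.InRange flags.length (c + k) := by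
                constructor <;> omega
              rcases hx : PySem.List.pyGet? flags (c + k) with _ | b
              · rw [PySem.List.pyGet?_eq_none_iff] at hx; exact absurd this hx
              · exact ⟨b, rfl⟩
            have hbt : b = true := by
              cases b
              · exact absurd hb hnf
              · rfl
            rw [PySem.List.pyRange_one_cons (by omega)]
            simp [pvScanA, hb, hbt]
            congr 2
            ring
          · rw [PySem.List.pyRange_one_eq_nil (by omega),
                PySem.List.pyRange_one_eq_nil (by omega)]
        rw [hlowstep, hhighstep, ih (k + 1) (by omega) (by push_cast at hkm ⊢; omega)]

-- ===== VERDICT (by name: the statement is the Claim_ definition above) =====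
theorem get_first_unflagged_channel_from_center_spec : Claim_equal_get_first_unflagged_channel_from_center := by
  intro flags _ hpre
  unfold Spec_get_first_unflagged_channel_from_center
  unfold get_first_unflagged_channel_from_center get_first_unflagged_channel_from_center_alt
  have hlen : 1 ≤ flags.length := by
    cases flags
    · exact absurd rfl hpre
    · simp
  have hfd : PySem.Int.floordiv (flags.length : Int) 2 = ((flags.length / 2 : Nat) : Int) := by
    exact_mod_cast PySem.Int.floordiv_natCast flags.length 2
  simp only [hfd]
  have := pv_key flags (flags.length : Int) ((flags.length / 2 : Nat) : Int) rfl
    (by positivity) (by exact_mod_cast Nat.div_lt_self (by omega) (by omega))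
    (flags.length + 1) 0 le_rfl (by push_cast; ring)
  simpa using this
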